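-- pv_equiv track=rewrite | github.com/melike-akkaya/PROQUEST | test/recordAnalysisForRAG.py | countRecordsByLengthRange
-- ===== SOURCE A (Python) =====
-- def countRecordsByLengthRange(recordLengths):
--     ranges = [0, 100000, 200000, 300000, 400000, 500000]
--     counts = [0] * (len(ranges) - 1)
--     for length in recordLengths:
--         for i in range(len(ranges) - 1):
--             if ranges[i] <= length < ranges[i + 1]:
--                 counts[i] += 1
--                 break
--     return counts, ranges
-- ===== SOURCE B (Python) =====
-- def countRecordsByLengthRange(recordLengths):
--     ranges = [0, 100000, 200000, 300000, 400000, 500000]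
--     counts = [0] * (len(ranges) - 1)
--     for length in recordLengths:
--         if 0 <= length < 500000:
--             counts[length // 100000] += 1
--     return counts, ranges
-- ===== Notes on version B (the rewrite author's own statement) =====
-- stated objective: simpler
-- what changed: Replaces the inner linear scan over the ranges list with direct arithmetic bucketing: guard 0 <= length < 500000 and increment counts[length // 100000], keeping the same out-of-range behaviour (negatives and values >= 500000 uncounted).
import Mathlib
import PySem

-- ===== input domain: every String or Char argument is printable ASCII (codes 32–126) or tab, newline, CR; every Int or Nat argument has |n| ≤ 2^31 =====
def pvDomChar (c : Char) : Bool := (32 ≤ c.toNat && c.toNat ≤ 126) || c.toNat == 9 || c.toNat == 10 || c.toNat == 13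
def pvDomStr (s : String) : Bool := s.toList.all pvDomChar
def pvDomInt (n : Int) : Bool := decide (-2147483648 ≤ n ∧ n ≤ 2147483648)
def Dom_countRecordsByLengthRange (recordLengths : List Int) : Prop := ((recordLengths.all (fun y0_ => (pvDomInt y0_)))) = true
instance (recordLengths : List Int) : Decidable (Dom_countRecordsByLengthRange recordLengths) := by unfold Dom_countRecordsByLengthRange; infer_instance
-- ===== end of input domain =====

-- B replaces A's inner scan over the ranges list by direct arithmetic bucketing (length // 100000): simpler.

-- ===== PORT A =====
-- inner 'for i in range(len(ranges)-1): if ranges[i] <= length < ranges[i+1]: counts[i] += 1; break'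
def pvInnerA (ranges : List Int) (length : Int) (counts : List Int) : List Int → List Int
  | [] => counts
  | i :: rest =>
      if PySem.List.pyGetD ranges i 0 ≤ length ∧ length < PySem.List.pyGetD ranges (i + 1) 0 then
        counts.set i.toNat (PySem.List.pyGetD counts i 0 + 1)   -- counts[i] += 1; break
      else
        pvInnerA ranges length counts rest

def countRecordsByLengthRange (recordLengths : List Int) : List Int × List Int :=
  let ranges : List Int := [0, 100000, 200000, 300000, 400000, 500000]
  let counts : List Int := List.replicate (ranges.length - 1) 0
  let counts := recordLengths.foldl
    (fun counts length => pvInnerA ranges length counts (PySem.List.pyRange 0 (ranges.length - 1) 1)) counts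
  (counts, ranges)

-- ===== PORT B =====
def countRecordsByLengthRange_alt (recordLengths : List Int) : List Int × List Int :=
  let ranges : List Int := [0, 100000, 200000, 300000, 400000, 500000]
  let counts : List Int := List.replicate (ranges.length - 1) 0
  let counts := recordLengths.foldl
    (fun counts length =>
      if 0 ≤ length ∧ length < 500000 then
        let i := PySem.Int.floordiv length 100000
        counts.set i.toNat (PySem.List.pyGetD counts i 0 + 1)
      else counts) counts
  (counts, ranges)

-- ===== PRECONDITION & SPEC =====
def Spec_countRecordsByLengthRange (recordLengths : List Int) (out : List Int × List Int) : Prop := out = countRecordsByLengthRange_alt recordLengths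
instance (recordLengths : List Int) (out : List Int × List Int) : Decidable (Spec_countRecordsByLengthRange recordLengths out) := by unfold Spec_countRecordsByLengthRange; infer_instance

-- ===== CLAIM (what is proved, stated in full; the proofs are below) =====
def Claim_equal_countRecordsByLengthRange : Prop := ∀ (recordLengths : List Int), Dom_countRecordsByLengthRange recordLengths → Spec_countRecordsByLengthRange recordLengths (countRecordsByLengthRange recordLengths)

-- ===== LEMMAS AND PROOFS =====

-- foldl respects pointwise-equal step functions.
theorem pvFoldl_fun_eq {α β : Type} {f g : α → β → α} (h : ∀ a b, f a b = g a b) :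
    ∀ (l : List β) (i : α), List.foldl f i l = List.foldl g i l := by
  intro l
  induction l with
  | nil => intro i; rfl
  | cons x xs ih => intro i; simp only [List.foldl_cons, h]; exact ih _

-- The two per-element step functions coincide.
theorem pvStep_eq (counts : List Int) (length : Int) :
    pvInnerA [0, 100000, 200000, 300000, 400000, 500000] length counts
      (PySem.List.pyRange 0 5 1)
    = (if 0 ≤ length ∧ length < 500000 then
        let i := PySem.Int.floordiv length 100000
        counts.set i.toNat (PySem.List.pyGetD counts i 0 + 1)
      else counts) := by
  have hr : PySem.List.pyRange 0 5 1 = [0, 1, 2, 3, 4] := by decide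
  have hfd : PySem.Int.floordiv length 100000 = length / 100000 :=
    PySem.Int.floordiv_eq_ediv_of_pos (by norm_num)
  rw [hr, hfd]
  have g0 : PySem.List.pyGetD [(0:Int), 100000, 200000, 300000, 400000, 500000] 0 0 = 0 := by decide
  have g1 : PySem.List.pyGetD [(0:Int), 100000, 200000, 300000, 400000, 500000] (0+1) 0 = 100000 := by decide
  have g1' : PySem.List.pyGetD [(0:Int), 100000, 200000, 300000, 400000, 500000] 1 0 = 100000 := by decide
  have g2 : PySem.List.pyGetD [(0:Int), 100000, 200000, 300000, 400000, 500000] (1+1) 0 = 200000 := by decide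
  have g2' : PySem.List.pyGetD [(0:Int), 100000, 200000, 300000, 400000, 500000] 2 0 = 200000 := by decide
  have g3 : PySem.List.pyGetD [(0:Int), 100000, 200000, 300000, 400000, 500000] (2+1) 0 = 300000 := by decide
  have g3' : PySem.List.pyGetD [(0:Int), 100000, 200000, 300000, 400000, 500000] 3 0 = 300000 := by decide
  have g4 : PySem.List.pyGetD [(0:Int), 100000, 200000, 300000, 400000, 500000] (3+1) 0 = 400000 := by decide
  have g4' : PySem.List.pyGetD [(0:Int), 100000, 200000, 300000, 400000, 500000] 4 0 = 400000 := by decide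
  have g5 : PySem.List.pyGetD [(0:Int), 100000, 200000, 300000, 400000, 500000] (4+1) 0 = 500000 := by decide
  simp only [pvInnerA, g0, g1, g1', g2, g2', g3, g3', g4, g4', g5]
  by_cases h0 : 0 ≤ length ∧ length < 100000
  · have hd : length / 100000 = 0 := by omega
    simp [h0, hd, (⟨h0.1, by omega⟩ : 0 ≤ length ∧ length < 500000)]
      <;> (intro hX; exact absurd hX (by omega))
  · by_cases h1 : 100000 ≤ length ∧ length < 200000
    · have hd : length / 100000 = 1 := by omega
      have hc : 0 ≤ length ∧ length < 500000 := ⟨by omega, by omega⟩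
      simp [h0, h1, hd, hc]
      <;> (intro hX; exact absurd hX (by omega))
    · by_cases h2 : 200000 ≤ length ∧ length < 300000
      · have hd : length / 100000 = 2 := by omega
        have hc : 0 ≤ length ∧ length < 500000 := ⟨by omega, by omega⟩
        simp [h0, h1, h2, hd, hc]
      <;> (intro hX; exact absurd hX (by omega))
      · by_cases h3 : 300000 ≤ length ∧ length < 400000
        · have hd : length / 100000 = 3 := by omega
          have hc : 0 ≤ length ∧ length < 500000 := ⟨by omega, by omega⟩
          simp [h0, h1, h2, h3, hd, hc]
      <;> (intro hX; exact absurd hX (by omega))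
        · by_cases h4 : 400000 ≤ length ∧ length < 500000
          · have hd : length / 100000 = 4 := by omega
            have hc : 0 ≤ length ∧ length < 500000 := ⟨by omega, by omega⟩
            simp [h0, h1, h2, h3, h4, hd, hc]
      <;> (intro hX; exact absurd hX (by omega))
          · have hc : ¬ (0 ≤ length ∧ length < 500000) := by omega
            simp [h0, h1, h2, h3, h4, hc]

-- ===== VERDICT (by name: the statement is the Claim_ definition above) =====
theorem countRecordsByLengthRange_spec : Claim_equal_countRecordsByLengthRange := by
  intro recordLengths _
  unfold Spec_countRecordsByLengthRange countRecordsByLengthRange countRecordsByLengthRange_alt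
  simp only
  congr 1
  apply pvFoldl_fun_eq
  intro counts length
  have h6 : ((([0, 100000, 200000, 300000, 400000, 500000] : List Int).length : Int) - 1) = 5 := by
    norm_num
  rw [h6]
  exact pvStep_eq counts length
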